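-- pv_equiv track=rewrite | github.com/shebbar27/course-opening-notifier | src/main.py | get_course_identifiers
-- ===== SOURCE A (Python) =====
-- def get_course_identifiers(data):
--     class_number = -1
--     course_id = -1
--     classes = []
--     if 'classes' in data:
--         classes = data['classes']
--     for clas in classes:
--         if 'CLAS' in clas:
--             class_data = clas['CLAS']
--             if 'CLASSNBR' in class_data:
--                 class_number = class_data['CLASSNBR']
--             if 'CRSEID' in class_data:
--                 course_id = class_data['CRSEID']
--     return class_number, course_id
-- ===== SOURCE B (Python) =====
-- def get_course_identifiers(data):
--     clas_datas = [c['CLAS'] for c in (data['classes'] if 'classes' in data else []) if 'CLAS' in c]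
--     class_number = next((cd['CLASSNBR'] for cd in reversed(clas_datas) if 'CLASSNBR' in cd), -1)
--     course_id = next((cd['CRSEID'] for cd in reversed(clas_datas) if 'CRSEID' in cd), -1)
--     return class_number, course_id
-- ===== Notes on version B (the rewrite author's own statement) =====
-- stated objective: idiomatic
-- what changed: Replaces the single fused forward loop that mutates two variables with an extracted list of CLAS sub-dicts followed by two independent reverse-scan next(...) searches, one per identifier.
import Mathlib
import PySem

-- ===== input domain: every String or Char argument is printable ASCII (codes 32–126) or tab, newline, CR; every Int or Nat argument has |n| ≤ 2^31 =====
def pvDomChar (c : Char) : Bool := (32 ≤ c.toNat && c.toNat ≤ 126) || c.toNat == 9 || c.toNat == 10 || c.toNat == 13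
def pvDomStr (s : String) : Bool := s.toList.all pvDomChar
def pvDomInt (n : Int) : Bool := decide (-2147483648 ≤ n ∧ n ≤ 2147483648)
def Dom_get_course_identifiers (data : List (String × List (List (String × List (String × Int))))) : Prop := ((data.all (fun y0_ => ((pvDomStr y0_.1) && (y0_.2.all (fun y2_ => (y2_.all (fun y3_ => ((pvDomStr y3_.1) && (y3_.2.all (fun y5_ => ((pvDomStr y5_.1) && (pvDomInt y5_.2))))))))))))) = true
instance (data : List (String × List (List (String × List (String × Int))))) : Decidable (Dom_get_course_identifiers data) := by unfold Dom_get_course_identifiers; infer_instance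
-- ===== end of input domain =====

-- B replaces A's single fused forward loop (two mutable variables) by an extracted list of
-- CLAS sub-dicts plus two independent reverse searches (idiomatic; return value only, no mutation).

-- shared helper: Python dict membership+subscript on an association list (first match)
def pvLookup {α : Type} (l : List (String × α)) (k : String) : Option α :=
  (l.find? (fun p => p.1 == k)).map (·.2)

-- ===== PORT A =====
def get_course_identifiers (data : List (String × List (List (String × List (String × Int))))) : Int × Int :=
  let classes : List (List (String × List (String × Int))) :=
    match pvLookup data "classes" with
    | some c => c
    | none => []
  classes.foldl (fun (st : Int × Int) clas =>
    match pvLookup clas "CLAS" with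
    | some class_data =>
      let st1 := match pvLookup class_data "CLASSNBR" with
        | some v => (v, st.2)
        | none => st
      match pvLookup class_data "CRSEID" with
      | some v => (st1.1, v)
      | none => st1
    | none => st) (-1, -1)

-- ===== PORT B =====
def get_course_identifiers_alt (data : List (String × List (List (String × List (String × Int))))) : Int × Int :=
  let clas_datas : List (List (String × Int)) :=
    (match pvLookup data "classes" with
     | some c => c
     | none => []).filterMap (fun clas => pvLookup clas "CLAS")
  let class_number := (clas_datas.reverse.findSome? (fun cd => pvLookup cd "CLASSNBR")).getD (-1)
  let course_id := (clas_datas.reverse.findSome? (fun cd => pvLookup cd "CRSEID")).getD (-1)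
  (class_number, course_id)

-- ===== PRECONDITION & SPEC =====
def Spec_get_course_identifiers (data : List (String × List (List (String × List (String × Int))))) (out : Int × Int) : Prop := out = get_course_identifiers_alt data
instance (data : List (String × List (List (String × List (String × Int))))) (out : Int × Int) : Decidable (Spec_get_course_identifiers data out) := by unfold Spec_get_course_identifiers; infer_instance

-- ===== CLAIM (what is proved, stated in full; the proofs are below) =====
def Claim_equal_get_course_identifiers : Prop := ∀ (data : List (String × List (List (String × List (String × Int))))), Dom_get_course_identifiers data → Spec_get_course_identifiers data (get_course_identifiers data)

-- ===== LEMMAS AND PROOFS =====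

-- the forward update loop returns, per component, the last present key (default the initial value)
theorem pv_foldl_eq (classes : List (List (String × List (String × Int)))) (a b : Int) :
    classes.foldl (fun (st : Int × Int) clas =>
      match pvLookup clas "CLAS" with
      | some class_data =>
        let st1 := match pvLookup class_data "CLASSNBR" with
          | some v => (v, st.2)
          | none => st
        match pvLookup class_data "CRSEID" with
        | some v => (st1.1, v)
        | none => st1
      | none => st) (a, b)
    = (((classes.filterMap (fun clas => pvLookup clas "CLAS")).reverse.findSome?
          (fun cd => pvLookup cd "CLASSNBR")).getD a,
       ((classes.filterMap (fun clas => pvLookup clas "CLAS")).reverse.findSome?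
          (fun cd => pvLookup cd "CRSEID")).getD b) := by
  induction classes generalizing a b with
  | nil => simp
  | cons c rest ih =>
    simp only [List.foldl_cons, List.filterMap_cons]
    cases hc : pvLookup c "CLAS" with
    | none => simpa [hc] using ih a b
    | some cd =>
      simp only [List.reverse_cons, List.findSome?_append]
      cases h1 : pvLookup cd "CLASSNBR" <;> cases h2 : pvLookup cd "CRSEID" <;>
        simp [h1, h2, ih, Option.getD]

-- ===== VERDICT (by name: the statement is the Claim_ definition above) =====
theorem get_course_identifiers_spec : Claim_equal_get_course_identifiers := by
  intro data _
  unfold Spec_get_course_identifiers get_course_identifiers get_course_identifiers_alt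
  cases pvLookup data "classes" with
  | none => simp
  | some c => exact pv_foldl_eq c (-1) (-1)
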